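-- pv_equiv track=rewrite | github.com/Roshan1115/PythonNTEL | Self Practive/thirdmin.py | thirdmin
-- ===== SOURCE A (Python) =====
-- def thirdmin(l):
--     (mymin, mysecondmin, mythirdmin) = (1000000, 1000000, 1000000)
--     for i in range(len(l)):
--         if l[i] < mymin:
--             mymin = l[i]
--     for i in range(len(l)):
--         if l[i] < mysecondmin and l[i] > mymin:
--             mysecondmin = l[i]
--     for i in range(len(l)):
--         if l[i] < mythirdmin and l[i] > mysecondmin:
--             mythirdmin = l[i]
--
--     return(mythirdmin)
-- ===== SOURCE B (Python) =====
-- def thirdmin(l):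
--     vals = sorted(set(x for x in l if x < 1000000))
--     return vals[2] if len(vals) >= 3 else 1000000
-- ===== Notes on version B (the rewrite author's own statement) =====
-- stated objective: simpler
-- what changed: Replaced the three sequential min-scans over the list with a single sort of the distinct values below the 1000000 sentinel and a direct index into the sorted result.
import Mathlib
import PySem

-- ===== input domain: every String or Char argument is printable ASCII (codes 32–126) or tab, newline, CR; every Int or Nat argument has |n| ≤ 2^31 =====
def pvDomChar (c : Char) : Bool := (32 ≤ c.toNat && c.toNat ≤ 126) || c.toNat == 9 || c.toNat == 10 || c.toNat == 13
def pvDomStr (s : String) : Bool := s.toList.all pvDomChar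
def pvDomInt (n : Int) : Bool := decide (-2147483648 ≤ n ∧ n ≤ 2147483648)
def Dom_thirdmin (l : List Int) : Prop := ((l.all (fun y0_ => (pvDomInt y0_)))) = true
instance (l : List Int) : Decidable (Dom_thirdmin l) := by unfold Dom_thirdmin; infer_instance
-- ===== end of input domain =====

-- B replaces A's three sequential min-scans by sorting the distinct values below the
-- 1000000 sentinel and indexing the third one (objective: simpler).

-- ===== PORT A =====
-- three passes: minimum, then minimum above it, then minimum above that (1000000 sentinel)
def thirdmin (l : List Int) : Int :=
  let mymin := l.foldl (fun m x => if x < m then x else m) 1000000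
  let mysecondmin := l.foldl (fun m x => if x < m ∧ mymin < x then x else m) 1000000
  let mythirdmin := l.foldl (fun m x => if x < m ∧ mysecondmin < x then x else m) 1000000
  mythirdmin

-- ===== PORT B =====
-- vals = sorted(set(x for x in l if x < 1000000)); vals[2] if len(vals) >= 3 else 1000000
def thirdmin_alt (l : List Int) : Int :=
  let vals := PySem.List.sorted (PySem.Set.ofList (l.filter (fun x => decide (x < 1000000)))) (fun x => x) false
  if 3 ≤ vals.length then (PySem.List.pyGet? vals 2).getD 1000000 else 1000000

-- ===== PRECONDITION & SPEC =====
def Spec_thirdmin (l : List Int) (out : Int) : Prop := out = thirdmin_alt l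
instance (l : List Int) (out : Int) : Decidable (Spec_thirdmin l out) := by unfold Spec_thirdmin; infer_instance

-- ===== CLAIM (what is proved, stated in full; the proofs are below) =====
def Claim_equal_thirdmin : Prop := ∀ (l : List Int), Dom_thirdmin l → Spec_thirdmin l (thirdmin l)

-- ===== LEMMAS AND PROOFS =====

-- the guarded update of A's first loop is a min-fold
theorem pvMinFold_eq (l : List Int) (c : Int) :
    l.foldl (fun m x => if x < m then x else m) c = l.foldl min c := by
  induction l generalizing c with
  | nil => rfl
  | cons x xs ih =>
      simp only [List.foldl_cons]
      rw [ih]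
      congr 1
      rw [min_def]
      split_ifs <;> omega

-- the guarded update of loops 2/3 is a min-fold over the elements above a
theorem pvNextFold_eq (a : Int) (l : List Int) (c : Int) :
    l.foldl (fun m x => if x < m ∧ a < x then x else m) c
      = (l.filter (fun x => decide (a < x))).foldl min c := by
  induction l generalizing c with
  | nil => rfl
  | cons x xs ih =>
      simp only [List.foldl_cons, List.filter_cons]
      by_cases h : a < x
      · simp only [h, and_true, decide_true, if_true, List.foldl_cons]
        rw [ih]
        congr 1
        rw [min_def]
        split_ifs <;> omega
      · simp only [h, and_false, decide_false, if_false]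
        exact ih c

theorem pvFoldMin_le_init (s : List Int) (c : Int) : s.foldl min c ≤ c := by
  induction s generalizing c with
  | nil => simp
  | cons x xs ih => exact le_trans (ih (min c x)) (min_le_left _ _)

theorem pvFoldMin_le_mem (s : List Int) (c x : Int) (hx : x ∈ s) : s.foldl min c ≤ x := by
  induction s generalizing c with
  | nil => cases hx
  | cons y ys ih =>
      rcases List.mem_cons.mp hx with h | h
      · subst h; exact le_trans (pvFoldMin_le_init ys (min c x)) (min_le_right _ _)
      · exact ih (min c y) h

theorem pvFoldMin_cases (s : List Int) (c : Int) : s.foldl min c = c ∨ s.foldl min c ∈ s := by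
  induction s generalizing c with
  | nil => left; rfl
  | cons y ys ih =>
      rcases ih (min c y) with h | h
      · rw [List.foldl_cons, h, min_def]
        split_ifs with hc
        · left; rfl
        · right; exact List.mem_cons_self
      · right; exact List.mem_cons_of_mem _ h

-- value of loops 2/3 when nothing lies strictly between a and the sentinel
theorem pvNext_none (a : Int) (l : List Int)
    (h : ∀ x ∈ l, a < x → ¬ x < 1000000) :
    l.foldl (fun m x => if x < m ∧ a < x then x else m) 1000000 = 1000000 := by
  rw [pvNextFold_eq]
  rcases pvFoldMin_cases (l.filter (fun x => decide (a < x))) 1000000 with hc | hc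
  · exact hc
  · have hm := List.mem_filter.mp hc
    have h1 := h _ hm.1 (by simpa using hm.2)
    have h2 := pvFoldMin_le_init (l.filter (fun x => decide (a < x))) 1000000
    omega

-- value of loops 2/3 when b is the least element strictly between a and the sentinel
theorem pvNext_min (a b : Int) (l : List Int)
    (hb : b ∈ l) (hab : a < b) (hb6 : b < 1000000)
    (hmin : ∀ x ∈ l, a < x → x < 1000000 → b ≤ x) :
    l.foldl (fun m x => if x < m ∧ a < x then x else m) 1000000 = b := by
  rw [pvNextFold_eq]
  have hbf : b ∈ l.filter (fun x => decide (a < x)) := List.mem_filter.mpr ⟨hb, by simpa using hab⟩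
  have hle := pvFoldMin_le_mem _ 1000000 b hbf
  rcases pvFoldMin_cases (l.filter (fun x => decide (a < x))) 1000000 with hc | hc
  · omega
  · have hm := List.mem_filter.mp hc
    have := hmin _ hm.1 (by simpa using hm.2) (by omega)
    omega

-- value of A's first loop: the overall minimum b (below the sentinel)
theorem pvFirst_min (b : Int) (l : List Int) (hb : b ∈ l) (hb6 : b < 1000000)
    (hmin : ∀ x ∈ l, x < 1000000 → b ≤ x) :
    l.foldl (fun m x => if x < m then x else m) 1000000 = b := by
  rw [pvMinFold_eq]
  have hle := pvFoldMin_le_mem _ 1000000 b hb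
  rcases pvFoldMin_cases l 1000000 with hc | hc
  · omega
  · have := hmin _ hc (by omega)
    omega

theorem pvFirst_none (l : List Int) (h : ∀ x ∈ l, ¬ x < 1000000) :
    l.foldl (fun m x => if x < m then x else m) 1000000 = 1000000 := by
  rw [pvMinFold_eq]
  rcases pvFoldMin_cases l 1000000 with hc | hc
  · exact hc
  · have := h _ hc
    have := pvFoldMin_le_init l 1000000
    omega

theorem pvMain (l : List Int) : thirdmin l = thirdmin_alt l := by
  unfold thirdmin thirdmin_alt
  simp only []
  have hmem : ∀ x : Int,
      x ∈ PySem.List.sorted (PySem.Set.ofList (l.filter (fun x => decide (x < 1000000)))) (fun x => x) false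
        ↔ (x ∈ l ∧ x < 1000000) := by
    intro x
    rw [PySem.List.mem_sorted, PySem.Set.mem_ofList, List.mem_filter]
    simp
  have hpw : (PySem.List.sorted (PySem.Set.ofList (l.filter (fun x => decide (x < 1000000)))) (fun x => x) false).Pairwise (· < ·) :=
    PySem.List.sorted_ofList_pairwise_lt _
  generalize hg : PySem.List.sorted (PySem.Set.ofList (l.filter (fun x => decide (x < 1000000)))) (fun x => x) false = v at hmem hpw ⊢
  clear hg
  rcases v with _ | ⟨x0, _ | ⟨x1, _ | ⟨x2, r⟩⟩⟩
  · have hno : ∀ x ∈ l, ¬ x < 1000000 := by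
      intro x hx hlt
      have : x ∈ ([] : List Int) := (hmem x).mpr ⟨hx, hlt⟩
      simp at this
    rw [pvFirst_none l hno, pvNext_none 1000000 l (by intro x hx h1 h2; omega),
        pvNext_none 1000000 l (by intro x hx h1 h2; omega)]
    simp
  · have hx0 := (hmem x0).mp (by simp)
    have h1 : l.foldl (fun m x => if x < m then x else m) 1000000 = x0 := by
      apply pvFirst_min x0 l hx0.1 hx0.2
      intro x hx hlt
      have : x ∈ [x0] := (hmem x).mpr ⟨hx, hlt⟩
      simp at this; omega
    rw [h1]
    have h2 : l.foldl (fun m x => if x < m ∧ x0 < x then x else m) 1000000 = 1000000 := by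
      apply pvNext_none
      intro x hx hgt hlt
      have : x ∈ [x0] := (hmem x).mpr ⟨hx, hlt⟩
      simp at this; omega
    rw [h2, pvNext_none 1000000 l (by intro x hx h1 h2; omega)]
    simp
  · have hx0 := (hmem x0).mp (by simp)
    have hx1 := (hmem x1).mp (by simp)
    have h01 : x0 < x1 := (List.pairwise_cons.mp hpw).1 x1 (by simp)
    have h1 : l.foldl (fun m x => if x < m then x else m) 1000000 = x0 := by
      apply pvFirst_min x0 l hx0.1 hx0.2
      intro x hx hlt
      have : x ∈ [x0, x1] := (hmem x).mpr ⟨hx, hlt⟩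
      simp at this; rcases this with h | h <;> omega
    rw [h1]
    have h2 : l.foldl (fun m x => if x < m ∧ x0 < x then x else m) 1000000 = x1 := by
      apply pvNext_min x0 x1 l hx1.1 h01 hx1.2
      intro x hx hgt hlt
      have : x ∈ [x0, x1] := (hmem x).mpr ⟨hx, hlt⟩
      simp at this; rcases this with h | h <;> omega
    rw [h2]
    have h3 : l.foldl (fun m x => if x < m ∧ x1 < x then x else m) 1000000 = 1000000 := by
      apply pvNext_none
      intro x hx hgt hlt
      have : x ∈ [x0, x1] := (hmem x).mpr ⟨hx, hlt⟩
      simp at this; rcases this with h | h <;> omega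
    rw [h3]
    simp
  · have hx0 := (hmem x0).mp (by simp)
    have hx1 := (hmem x1).mp (by simp)
    have hx2 := (hmem x2).mp (by simp)
    have h01 : x0 < x1 := (List.pairwise_cons.mp hpw).1 x1 (by simp)
    have hpw1 := (List.pairwise_cons.mp hpw).2
    have h12 : x1 < x2 := (List.pairwise_cons.mp hpw1).1 x2 (by simp)
    have hpw2 := (List.pairwise_cons.mp hpw1).2
    have h2r : ∀ y ∈ r, x2 < y := (List.pairwise_cons.mp hpw2).1
    have h0lo : ∀ y, y ∈ x1 :: x2 :: r → x0 < y := (List.pairwise_cons.mp hpw).1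
    have h1lo : ∀ y, y ∈ x2 :: r → x1 < y := (List.pairwise_cons.mp hpw1).1
    have h1 : l.foldl (fun m x => if x < m then x else m) 1000000 = x0 := by
      apply pvFirst_min x0 l hx0.1 hx0.2
      intro x hx hlt
      have hxv : x ∈ x0 :: x1 :: x2 :: r := (hmem x).mpr ⟨hx, hlt⟩
      rcases List.mem_cons.mp hxv with h | h
      · omega
      · have := h0lo x h; omega
    rw [h1]
    have h2 : l.foldl (fun m x => if x < m ∧ x0 < x then x else m) 1000000 = x1 := by
      apply pvNext_min x0 x1 l hx1.1 h01 hx1.2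
      intro x hx hgt hlt
      have hxv : x ∈ x0 :: x1 :: x2 :: r := (hmem x).mpr ⟨hx, hlt⟩
      rcases List.mem_cons.mp hxv with h | h
      · omega
      · rcases List.mem_cons.mp h with h' | h'
        · omega
        · have := h1lo x h'; omega
    rw [h2]
    have h3 : l.foldl (fun m x => if x < m ∧ x1 < x then x else m) 1000000 = x2 := by
      apply pvNext_min x1 x2 l hx2.1 h12 hx2.2
      intro x hx hgt hlt
      have hxv : x ∈ x0 :: x1 :: x2 :: r := (hmem x).mpr ⟨hx, hlt⟩
      rcases List.mem_cons.mp hxv with h | h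
      · omega
      · rcases List.mem_cons.mp h with h' | h'
        · omega
        · rcases List.mem_cons.mp h' with h'' | h''
          · omega
          · have := h2r x h''; omega
    rw [h3]
    have hlen : 3 ≤ (x0 :: x1 :: x2 :: r).length := by simp
    rw [if_pos hlen]
    have hget : PySem.List.pyGet? (x0 :: x1 :: x2 :: r) 2 = some x2 := by
      have h2le : (2:Int) ≤ (r.length:Int) + 1 + 1 := by omega
      simp [PySem.List.pyGet?, PySem.List.pyIdx?, h2le]
    rw [hget]
    rfl

-- ===== VERDICT (by name: the statement is the Claim_ definition above) =====
theorem thirdmin_spec : Claim_equal_thirdmin := by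
  intro l _
  unfold Spec_thirdmin
  exact pvMain l
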